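-- pv_equiv track=rewrite | github.com/phil-huynh/Problem-Sets | python/CodeWars/6kyu/train_problem.py | is_valid_train_arrangement
-- ===== SOURCE A (Python) =====
-- def create_cache(track):
--     cache, cars = {}, []
--     for i, char in enumerate(track):
--         if char != ".":
--             cache[char] = [i] if not cache.get(char) else cache[char] + [i]
--             cars.append(char)
--     return cache, "".join(cars)
--
-- def is_valid_train_arrangement(before, after):
--     cache1, cars1 = create_cache(before)
--     cache2, cars2 = create_cache(after)
--     if cars1 != cars2 or len(before) != len(after):
--         return False
--     for train in cache1:
--         if list(cache1.keys()) != list(cache2.keys()) or \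
--             len(cache1[train]) != len(cache2[train]):
--             return False
--         for j, car in enumerate(cache1[train]):
--             if train == "<" and cache1[train][j] < cache2[train][j] or \
--                 train == ">" and cache1[train][j] > cache2[train][j]:
--                 return False
--     return True
-- ===== SOURCE B (Python) =====
-- def is_valid_train_arrangement(before, after):
--     if len(before) != len(after):
--         return False
--     b = [(c, i) for i, c in enumerate(before) if c != "."]
--     a = [(c, i) for i, c in enumerate(after) if c != "."]
--     if [c for c, _ in b] != [c for c, _ in a]:
--         return False
--     return all(not (c == "<" and i1 < i2 or c == ">" and i1 > i2)
--                for (c, i1), (_, i2) in zip(b, a))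
-- ===== Notes on version B (the rewrite author's own statement) =====
-- stated objective: faster
-- what changed: B drops A's per-character grouping dict entirely: one flat pass collects the non-dot cars with their indices from each string, and a single sequential zip of the two flat lists checks every direction constraint, instead of building dicts keyed by car character (rebuilding each index list with 'cache[char] + [i]', a full copy per occurrence) and nesting a loop over keys with an inner indexed loop per key.
import Mathlib
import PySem

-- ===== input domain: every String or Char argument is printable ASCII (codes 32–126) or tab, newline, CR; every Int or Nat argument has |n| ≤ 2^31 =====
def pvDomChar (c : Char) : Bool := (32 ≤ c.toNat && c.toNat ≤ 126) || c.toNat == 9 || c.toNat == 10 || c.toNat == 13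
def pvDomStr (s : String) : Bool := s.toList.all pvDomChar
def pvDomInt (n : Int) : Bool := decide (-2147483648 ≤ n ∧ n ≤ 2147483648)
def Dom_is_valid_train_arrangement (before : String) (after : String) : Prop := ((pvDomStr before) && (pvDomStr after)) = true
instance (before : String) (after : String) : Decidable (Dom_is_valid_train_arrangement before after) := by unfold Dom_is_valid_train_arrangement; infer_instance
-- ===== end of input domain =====

-- B replaces A's per-character grouping dict (plus nested key/index loops) by one flat
-- pass per string and a single sequential zip of the non-dot cars; objective: faster
-- (A copies a per-car index list on every occurrence via 'cache[char] + [i]').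

-- ===== PORT A =====
-- loop body of create_cache: 'if char != ".": cache[char] = [i] if not cache.get(char) else cache[char] + [i]; cars.append(char)'
def create_cache_step (s : PySem.Dict Char (List Int) × List Char) (p : Int × Char) :
    PySem.Dict Char (List Int) × List Char :=
  if p.2 ≠ '.' then
    (s.1.insert p.2 (match s.1.get? p.2 with
      | none => [p.1]
      | some xs => if xs = [] then [p.1] else xs ++ [p.1]),
     s.2 ++ [p.2])
  else s

def create_cache (track : String) : PySem.Dict Char (List Int) × String :=
  let st := (PySem.List.enumerate track.toList).foldl create_cache_step (PySem.Dict.empty, [])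
  (st.1, String.ofList st.2)

-- 'for j, car in enumerate(cache1[train]): if train == "<" and cache1[train][j] < cache2[train][j] or ...: return False'
-- pyGetD is exact here: j ranges over the indices of l1 and the caller has already
-- checked len(cache1[train]) == len(cache2[train]), so both indexings are in range.
def inner_loop (train : Char) (l1 l2 : List Int) : Bool :=
  (PySem.List.enumerate l1).all (fun p =>
    !((train == '<' && decide (PySem.List.pyGetD l1 p.1 0 < PySem.List.pyGetD l2 p.1 0)) ||
      (train == '>' && decide (PySem.List.pyGetD l1 p.1 0 > PySem.List.pyGetD l2 p.1 0))))

-- 'for train in cache1: ...' with its early returns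
def outer_loop (cache1 cache2 : PySem.Dict Char (List Int)) : List Char → Bool
  | [] => true
  | train :: rest =>
    if cache1.keys ≠ cache2.keys ∨ (cache1.getD train []).length ≠ (cache2.getD train []).length then
      false
    else if inner_loop train (cache1.getD train []) (cache2.getD train []) then
      outer_loop cache1 cache2 rest
    else false

def is_valid_train_arrangement (before : String) (after : String) : Bool :=
  let r1 := create_cache before
  let r2 := create_cache after
  if r1.2 ≠ r2.2 ∨ before.toList.length ≠ after.toList.length then false
  else outer_loop r1.1 r2.1 r1.1.keys

-- ===== PORT B =====
-- '[(c, i) for i, c in enumerate(track) if c != "."]'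
def pv_cars (track : String) : List (Char × Int) :=
  ((PySem.List.enumerate track.toList).filter (fun p => p.2 ≠ '.')).map (fun p => (p.2, p.1))

def is_valid_train_arrangement_alt (before : String) (after : String) : Bool :=
  if before.toList.length ≠ after.toList.length then false
  else
    let b := pv_cars before
    let a := pv_cars after
    if b.map Prod.fst ≠ a.map Prod.fst then false
    else (b.zip a).all (fun q =>
      !((q.1.1 == '<' && decide (q.1.2 < q.2.2)) || (q.1.1 == '>' && decide (q.1.2 > q.2.2))))

-- ===== PRECONDITION & SPEC =====
def Spec_is_valid_train_arrangement (before : String) (after : String) (out : Bool) : Prop := out = is_valid_train_arrangement_alt before after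
instance (before : String) (after : String) (out : Bool) : Decidable (Spec_is_valid_train_arrangement before after out) := by unfold Spec_is_valid_train_arrangement; infer_instance

-- ===== CLAIM (what is proved, stated in full; the proofs are below) =====
def Claim_equal_is_valid_train_arrangement : Prop := ∀ (before : String) (after : String), Dom_is_valid_train_arrangement before after → Spec_is_valid_train_arrangement before after (is_valid_train_arrangement before after)

-- ===== LEMMAS AND PROOFS =====

-- the per-character direction test shared (after unfolding) by both sides
def pvQ (c : Char) (i1 i2 : Int) : Bool :=
  !((c == '<' && decide (i1 < i2)) || (c == '>' && decide (i1 > i2)))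

-- A's grouping fold, isolated for the proofs
def pvGroup (ps : List (Char × Int)) : PySem.Dict Char (List Int) :=
  ps.foldl (fun d q => d.modify q.1 [] (· ++ [q.2])) PySem.Dict.empty

lemma create_cache_step_eq (d : PySem.Dict Char (List Int)) (cs : List Char) (p : Int × Char)
    (h : p.2 ≠ '.') :
    create_cache_step (d, cs) p = (d.modify p.2 [] (· ++ [p.1]), cs ++ [p.2]) := by
  simp only [create_cache_step, if_pos h]
  have hm : d.modify p.2 [] (· ++ [p.1]) = d.insert p.2 (d.getD p.2 [] ++ [p.1]) := by
    simp [PySem.Dict.modify, PySem.Dict.insert, PySem.Dict.getD]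
  rw [hm]
  have hv : (match d.get? p.2 with
      | none => [p.1]
      | some xs => if xs = [] then [p.1] else xs ++ [p.1]) = d.getD p.2 [] ++ [p.1] := by
    rw [PySem.Dict.getD_eq_get?_getD]
    cases hg : d.get? p.2 with
    | none => simp
    | some xs => cases xs <;> simp
  rw [hv]

-- A's fold is the grouping fold on the filtered, swapped pairs, alongside the flat car list
lemma create_cache_foldl_eq (l : List (Int × Char)) (d : PySem.Dict Char (List Int)) (cs : List Char) :
    l.foldl create_cache_step (d, cs)
      = (((l.filter (fun p => p.2 ≠ '.')).map (fun p => (p.2, p.1))).foldl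
           (fun d q => d.modify q.1 [] (· ++ [q.2])) d,
         cs ++ (((l.filter (fun p => p.2 ≠ '.')).map (fun p => (p.2, p.1))).map Prod.fst)) := by
  induction l generalizing d cs with
  | nil => simp
  | cons p t ih =>
    by_cases h : p.2 = '.'
    · simp [List.foldl_cons, create_cache_step, h, ih]
    · rw [List.foldl_cons, create_cache_step_eq d cs p h, ih]
      simp [h, List.append_assoc]

lemma create_cache_eq (track : String) :
    create_cache track = (pvGroup (pv_cars track), String.ofList ((pv_cars track).map Prod.fst)) := by
  simp only [create_cache, pvGroup, pv_cars, create_cache_foldl_eq, List.nil_append]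

lemma keys_pvGroup (ps : List (Char × Int)) :
    (pvGroup ps).keys = PySem.Set.ofList (ps.map Prod.fst) := by
  rw [pvGroup, PySem.Dict.keys_foldl_modify_key]
  simp [PySem.Set.update_nil_left]

lemma getD_pvGroup (ps : List (Char × Int)) (c : Char) :
    (pvGroup ps).getD c [] = (ps.filter (fun p => p.1 == c)).map Prod.snd := by
  rw [pvGroup, PySem.Dict.getD_foldl_modify_append]
  simp

lemma filter_fst_length (ps1 ps2 : List (Char × Int)) (h : ps1.map Prod.fst = ps2.map Prod.fst)
    (c : Char) :
    (ps1.filter (fun p => p.1 == c)).length = (ps2.filter (fun p => p.1 == c)).length := by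
  have key : ∀ ps : List (Char × Int),
      (ps.filter (fun p => p.1 == c)).length = (ps.map Prod.fst).countP (· == c) := by
    intro ps
    rw [List.countP_map, List.countP_eq_length_filter]
    rfl
  rw [key, key, h]

lemma mem_enumerate {α : Type} (xs : List α) (s : Int) (p : Int × α) :
    p ∈ PySem.List.enumerate xs s ↔ ∃ k : Nat, p.1 = s + k ∧ xs[k]? = some p.2 := by
  induction xs generalizing s with
  | nil => simp [PySem.List.enumerate_nil]
  | cons x t ih =>
    rw [PySem.List.enumerate_cons, List.mem_cons, ih]
    constructor
    · rintro (rfl | ⟨k, hk, hg⟩)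
      · exact ⟨0, by simp⟩
      · exact ⟨k + 1, by push_cast at hk ⊢; omega, by simpa using hg⟩
    · rintro ⟨k, hk, hg⟩
      cases k with
      | zero =>
        left
        simp at hg hk
        cases p; simp_all
      | succ k =>
        right
        exact ⟨k, by push_cast at hk ⊢; omega, by simpa using hg⟩

lemma inner_loop_eq_zip_all (t : Char) (l1 l2 : List Int) (h : l1.length = l2.length) :
    inner_loop t l1 l2 = (l1.zip l2).all (fun q => pvQ t q.1 q.2) := by
  rw [Bool.eq_iff_iff]
  simp only [inner_loop, List.all_eq_true, pvQ]
  constructor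
  · intro H q hq
    rw [List.mem_iff_getElem] at hq
    obtain ⟨k, hk, rfl⟩ := hq
    have hk1 : k < l1.length := by simp [List.length_zip] at hk; omega
    have hk2 : k < l2.length := by simp [List.length_zip] at hk; omega
    have := H ((k : Int), l1[k]) ((mem_enumerate l1 0 _).2 ⟨k, by simp, by simp [hk1]⟩)
    simpa [PySem.List.pyGetD_natCast, List.getD_eq_getElem?_getD, hk1, hk2] using this
  · intro H p hp
    rw [mem_enumerate] at hp
    obtain ⟨k, hk, hg⟩ := hp
    have hk1 : k < l1.length := by
      rcases Nat.lt_or_ge k l1.length with h' | h'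
      · exact h'
      · rw [List.getElem?_eq_none h'] at hg; cases hg
    have hk2 : k < l2.length := by omega
    have := H (l1[k], l2[k]) (by
      rw [List.mem_iff_getElem]
      exact ⟨k, by simp [List.length_zip]; omega, by simp [List.getElem_zip]⟩)
    have hp1 : p.1 = (k : Int) := by simpa using hk
    simpa [hp1, PySem.List.pyGetD_natCast, List.getD_eq_getElem?_getD, hk1, hk2] using this

lemma zip_filter_fst (ps1 ps2 : List (Char × Int)) (h : ps1.map Prod.fst = ps2.map Prod.fst) (c : Char) :
    ((ps1.filter (fun p => p.1 == c)).map Prod.snd).zip ((ps2.filter (fun p => p.1 == c)).map Prod.snd)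
      = ((ps1.zip ps2).filter (fun q => q.1.1 == c)).map (fun q => (q.1.2, q.2.2)) := by
  induction ps1 generalizing ps2 with
  | nil =>
    cases ps2 with
    | nil => simp
    | cons q t => simp at h
  | cons p t1 ih =>
    cases ps2 with
    | nil => simp at h
    | cons q t2 =>
      simp only [List.map_cons, List.cons.injEq] at h
      obtain ⟨hf, ht⟩ := h
      by_cases hc : p.1 = c
      · simp [List.zip_cons_cons, hc, ← hf, ih t2 ht]
      · have hq : (q.1 == c) = false := by simp [← hf, hc]
        simp [List.zip_cons_cons, hc, hq, ih t2 ht]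

lemma outer_loop_all (c1 c2 : PySem.Dict Char (List Int))
    (hk : c1.keys = c2.keys) (hl : ∀ t, (c1.getD t []).length = (c2.getD t []).length) :
    ∀ ks : List Char, outer_loop c1 c2 ks
      = ks.all (fun t => inner_loop t (c1.getD t []) (c2.getD t [])) := by
  intro ks
  induction ks with
  | nil => rfl
  | cons t rest ih =>
    rw [outer_loop, if_neg (by simp [hk, hl t])]
    by_cases hi : inner_loop t (c1.getD t []) (c2.getD t []) = true
    · simp [hi, ih]
    · simp [Bool.not_eq_true] at hi
      simp [hi]

-- the core: A's per-key nested check equals B's flat sequential check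
lemma core_eq (ps1 ps2 : List (Char × Int)) (h : ps1.map Prod.fst = ps2.map Prod.fst) :
    (PySem.Set.ofList (ps1.map Prod.fst)).all
        (fun c => inner_loop c ((ps1.filter (fun p => p.1 == c)).map Prod.snd)
                               ((ps2.filter (fun p => p.1 == c)).map Prod.snd))
      = (ps1.zip ps2).all (fun q => pvQ q.1.1 q.1.2 q.2.2) := by
  have hstep : ∀ c, inner_loop c ((ps1.filter (fun p => p.1 == c)).map Prod.snd)
                               ((ps2.filter (fun p => p.1 == c)).map Prod.snd)
      = (((ps1.zip ps2).filter (fun q => q.1.1 == c)).map (fun q => (q.1.2, q.2.2))).all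
          (fun q => pvQ c q.1 q.2) := by
    intro c
    rw [inner_loop_eq_zip_all c _ _ (by simp [filter_fst_length ps1 ps2 h c]),
        zip_filter_fst ps1 ps2 h c]
  rw [Bool.eq_iff_iff]
  simp only [List.all_eq_true]
  constructor
  · intro H q hq
    have hc : q.1.1 ∈ PySem.Set.ofList (ps1.map Prod.fst) := by
      rw [PySem.Set.mem_ofList]
      exact List.mem_map.2 ⟨q.1, (List.of_mem_zip hq).1, rfl⟩
    have := H q.1.1 hc
    rw [hstep q.1.1] at this
    simp only [List.all_eq_true] at this
    have := this (q.1.2, q.2.2) (List.mem_map.2 ⟨q, List.mem_filter.2 ⟨hq, by simp⟩, rfl⟩)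
    exact this
  · intro H c _hc
    rw [hstep c]
    simp only [List.all_eq_true]
    intro r hr
    obtain ⟨q, hq, rfl⟩ := List.mem_map.1 hr
    have hqf := List.mem_filter.1 hq
    have hcq : q.1.1 = c := by simpa using hqf.2
    rw [← hcq]
    exact H q hqf.1

-- ===== VERDICT (by name: the statement is the Claim_ definition above) =====
theorem is_valid_train_arrangement_spec : Claim_equal_is_valid_train_arrangement := by
  intro before after _hdom
  unfold Spec_is_valid_train_arrangement
  simp only [is_valid_train_arrangement, is_valid_train_arrangement_alt, create_cache_eq]
  by_cases hlen : before.toList.length = after.toList.length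
  · by_cases hcars : (pv_cars before).map Prod.fst = (pv_cars after).map Prod.fst
    · rw [if_neg (by simp [hlen, hcars]), if_neg (by simp [hlen]), if_neg (by simp [hcars])]
      have hgd : ∀ t, ((pvGroup (pv_cars before)).getD t []).length
          = ((pvGroup (pv_cars after)).getD t []).length := by
        intro t
        rw [getD_pvGroup, getD_pvGroup]
        simp [filter_fst_length _ _ hcars t]
      rw [outer_loop_all _ _ (by rw [keys_pvGroup, keys_pvGroup, hcars]) hgd]
      rw [keys_pvGroup]
      have := core_eq (pv_cars before) (pv_cars after) hcars
      simp only [getD_pvGroup]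
      exact this
    · rw [if_pos, if_neg (by simp [hlen]), if_pos (by simpa using hcars)]
      left
      intro hs
      exact hcars (by simpa using congrArg String.toList hs)
  · rw [if_pos (by right; exact hlen), if_pos (by simpa using hlen)]
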